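-- pv_equiv track=rewrite | github.com/AmirrezaFarnamTaheri/StreamlineVPN | src/vpn_merger/core/config_processor.py | _is_valid_config
-- ===== SOURCE A (Python) =====
-- def _is_valid_config(config: str) -> bool:
--     """Check if configuration is valid.
--
--     Args:
--         config: Configuration string to validate
--
--     Returns:
--         True if configuration is valid, False otherwise
--     """
--     if not config:
--         return False
--
--     # Strip whitespace for validation
--     config = config.strip()
--
--     # Check minimum length (some valid configs can be short)
--     if len(config) < 8:  # Minimum: protocol:// + at least 1 char
--         return False
--
--     # Check maximum length to prevent extremely long configs
--     if len(config) > 10000:  # Maximum reasonable length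
--         return False
--
--     # Check for basic protocol indicators
--     valid_protocols = [
--         "vmess://",
--         "vless://",
--         "trojan://",
--         "ss://",
--         "ssr://",
--         "hysteria://",
--         "tuic://",
--         "hysteria2://",
--     ]
--
--     # Check if config starts with a valid protocol
--     for proto in valid_protocols:
--         if config.startswith(proto):
--             # Ensure there's content after the protocol
--             if len(config) <= len(proto):
--                 return False
--             return True
--
--     return False
-- ===== SOURCE B (Python) =====
-- VALID_NAMES = {"vmess", "vless", "trojan", "ss", "ssr", "hysteria", "tuic", "hysteria2"}
--
--
-- def _is_valid_config(config: str) -> bool: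
--     if not config:
--         return False
--     config = config.strip()
--     n = len(config)
--     if n < 8 or n > 10000:
--         return False
--     i = config.find("://")
--     return i != -1 and config[:i] in VALID_NAMES and i + 3 < n
-- ===== Notes on version B (the rewrite author's own statement) =====
-- stated objective: simpler
-- what changed: Replaces the per-protocol startswith loop with a single find of the protocol separator followed by a set-membership test on the bare protocol name and a non-empty-remainder length check.
import Mathlib
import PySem

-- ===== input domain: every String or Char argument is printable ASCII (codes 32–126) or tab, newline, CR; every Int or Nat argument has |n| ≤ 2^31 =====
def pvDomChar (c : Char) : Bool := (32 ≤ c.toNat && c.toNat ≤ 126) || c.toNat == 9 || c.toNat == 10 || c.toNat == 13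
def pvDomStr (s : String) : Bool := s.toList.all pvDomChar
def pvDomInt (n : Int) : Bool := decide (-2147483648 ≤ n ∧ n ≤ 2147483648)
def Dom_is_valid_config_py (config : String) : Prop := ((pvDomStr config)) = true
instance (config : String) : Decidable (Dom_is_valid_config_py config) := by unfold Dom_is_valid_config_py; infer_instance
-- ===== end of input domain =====

-- B replaces A's per-protocol startswith loop by one find of "://" plus a set lookup of the bare
-- protocol name and a non-empty-remainder check (objective: simpler; same behaviour).

-- ===== PORT A =====
-- the valid_protocols list, in A's order
def pvProtos : List (List Char) :=    -- "vmess://", "vless://", "trojan://", "ss://", "ssr://", "hysteria://", "tuic://", "hysteria2://"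
  [['v','m','e','s','s',':','/','/'], ['v','l','e','s','s',':','/','/'],
   ['t','r','o','j','a','n',':','/','/'], ['s','s',':','/','/'], ['s','s','r',':','/','/'],
   ['h','y','s','t','e','r','i','a',':','/','/'], ['t','u','i','c',':','/','/'],
   ['h','y','s','t','e','r','i','a','2',':','/','/']]

-- A's 'for proto in valid_protocols' loop with its early returns
def pvLoopA : List (List Char) → List Char → Bool
  | [], _ => false
  | p :: ps, cs =>
      if PySem.Chars.startswith cs p then
        -- 'if len(config) <= len(proto): return False / return True'
        decide (p.length < cs.length)
      else pvLoopA ps cs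

def is_valid_config_py (config : String) : Bool :=
  if config.toList = [] then false            -- 'if not config'
  else
    let cs := PySem.Chars.strip config.toList
    if cs.length < 8 then false
    else if cs.length > 10000 then false
    else pvLoopA pvProtos cs

-- ===== PORT B =====
def pvSep : List Char := [':', '/', '/']

-- VALID_NAMES (a Python set of 8 distinct literals; as a list of its distinct elements)
def pvNames : List (List Char) :=    -- {"vmess", "vless", "trojan", "ss", "ssr", "hysteria", "tuic", "hysteria2"}
  [['v','m','e','s','s'], ['v','l','e','s','s'], ['t','r','o','j','a','n'], ['s','s'],
   ['s','s','r'], ['h','y','s','t','e','r','i','a'], ['t','u','i','c'],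
   ['h','y','s','t','e','r','i','a','2']]

-- Source B's return expression: i = config.find("://"); i != -1 and config[:i] in VALID_NAMES and i + 3 < n
-- (config[:i] is only reached with i ≥ 0, where the slice is List.take i)
def pvCheckB (cs : List Char) : Bool :=
  let i := PySem.Chars.find cs pvSep
  decide (i ≠ -1) && decide (cs.take i.toNat ∈ pvNames) && decide (i + 3 < (cs.length : Int))

def is_valid_config_py_alt (config : String) : Bool :=
  if config.toList = [] then false            -- 'if not config'
  else
    let cs := PySem.Chars.strip config.toList
    let n := cs.length
    if n < 8 ∨ n > 10000 then false
    else pvCheckB cs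

-- ===== PRECONDITION & SPEC =====
def Spec_is_valid_config_py (config : String) (out : Bool) : Prop := out = is_valid_config_py_alt config
instance (config : String) (out : Bool) : Decidable (Spec_is_valid_config_py config out) := by unfold Spec_is_valid_config_py; infer_instance

-- ===== CLAIM (what is proved, stated in full; the proofs are below) =====
def Claim_equal_is_valid_config_py : Prop := ∀ (config : String), Dom_is_valid_config_py config → Spec_is_valid_config_py config (is_valid_config_py config)

-- ===== LEMMAS AND PROOFS =====

-- the common characterisation: cs is a known bare name, then "://", then a non-empty rest
def pvGood (cs : List Char) : Prop :=
  ∃ name ∈ pvNames, ∃ r : List Char, r ≠ [] ∧ cs = name ++ pvSep ++ r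

lemma pvLoopA_true {ps : List (List Char)} {cs : List Char} (h : pvLoopA ps cs = true) :
    ∃ p ∈ ps, PySem.Chars.startswith cs p = true ∧ p.length < cs.length := by
  induction ps with
  | nil => simp [pvLoopA] at h
  | cons p ps ih =>
      by_cases hs : PySem.Chars.startswith cs p = true
      · refine ⟨p, by simp, hs, ?_⟩
        simp only [pvLoopA, hs, if_true] at h
        exact of_decide_eq_true h
      · simp only [pvLoopA, hs, Bool.false_eq_true, if_false] at h
        obtain ⟨q, hq, h1, h2⟩ := ih h
        exact ⟨q, by simp [hq], h1, h2⟩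

lemma pvA_good {cs : List Char} (h : pvLoopA pvProtos cs = true) : pvGood cs := by
  obtain ⟨p, hp, hs, hl⟩ := pvLoopA_true h
  obtain ⟨t, rfl⟩ := (PySem.Chars.startswith_iff _ p).mp hs
  have ht : t ≠ [] := by intro h0; subst h0; simp at hl
  have h1 : p.take (p.length - 3) ∈ pvNames := by fin_cases hp <;> decide
  have h2 : p = p.take (p.length - 3) ++ pvSep := by fin_cases hp <;> decide
  have h4 : p ++ t = p.take (p.length - 3) ++ pvSep ++ t := by
    conv_lhs => rw [h2]
  exact ⟨p.take (p.length - 3), h1, t, ht, h4⟩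

lemma pvGood_A {cs : List Char} (h : pvGood cs) : pvLoopA pvProtos cs = true := by
  obtain ⟨name, hmem, r, hr, rfl⟩ := h
  have hr' : 0 < r.length := List.length_pos_iff.mpr hr
  fin_cases hmem <;>
    (simp [pvLoopA, pvProtos, pvSep, PySem.Chars.startswith, List.isPrefixOf]; omega)

-- find points at the first occurrence; conversely these two facts pin it down
lemma pvFind_eq {cs sub : List Char} {k : Nat} (h1 : sub <+: cs.drop k)
    (h2 : ∀ j < k, ¬ sub <+: cs.drop j) : PySem.Chars.find cs sub = k := by
  have hin : sub <:+: cs := (List.infix_iff_prefix_suffix).mpr ⟨cs.drop k, h1, List.drop_suffix k cs⟩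
  have hnn : 0 ≤ PySem.Chars.find cs sub := (PySem.Chars.find_nonneg_iff cs sub).mpr hin
  obtain ⟨hp, hmin⟩ := PySem.Chars.find_spec hnn
  rcases Nat.lt_trichotomy (PySem.Chars.find cs sub).toNat k with h | h | h
  · exact absurd hp (h2 _ h)
  · omega
  · exact absurd h1 (hmin k h)

lemma pvB_good {cs : List Char} (h : pvCheckB cs = true) : pvGood cs := by
  unfold pvCheckB at h
  simp only [Bool.and_eq_true, decide_eq_true_eq] at h
  obtain ⟨⟨hne, hmem⟩, hlen⟩ := h
  have hnn : 0 ≤ PySem.Chars.find cs pvSep := by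
    have := PySem.Chars.neg_one_le_find cs pvSep
    omega
  obtain ⟨hp, -⟩ := PySem.Chars.find_spec hnn
  obtain ⟨t, ht⟩ := hp
  refine ⟨cs.take (PySem.Chars.find cs pvSep).toNat, hmem, t, ?_, ?_⟩
  · intro h0; subst h0
    have hld := congrArg List.length ht
    rw [List.length_append, List.length_nil, List.length_drop] at hld
    have h3 : pvSep.length = 3 := rfl
    omega
  · conv_lhs => rw [← cs.take_append_drop (PySem.Chars.find cs pvSep).toNat, ← ht]
    simp

lemma pvGood_B {cs : List Char} (h : pvGood cs) : pvCheckB cs = true := by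
  obtain ⟨name, hmem, r, hr, rfl⟩ := h
  have hr' : 0 < r.length := List.length_pos_iff.mpr hr
  have hfind : PySem.Chars.find (name ++ pvSep ++ r) pvSep = name.length := by
    apply pvFind_eq
    · rw [List.append_assoc, List.drop_left]
      exact ⟨r, rfl⟩
    · intro j hj
      fin_cases hmem <;>
        (simp only [List.length] at hj
         interval_cases j <;> simp [pvSep, List.cons_prefix_cons])
  simp only [pvCheckB, hfind, Bool.and_eq_true, decide_eq_true_eq]
  refine ⟨⟨by omega, ?_⟩, ?_⟩
  · rw [Int.toNat_natCast, List.append_assoc, List.take_left]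
    exact hmem
  · simp [pvSep]
    omega

lemma pvLoopA_eq_checkB (cs : List Char) : pvLoopA pvProtos cs = pvCheckB cs := by
  rcases h : pvCheckB cs with _ | _
  · rcases h' : pvLoopA pvProtos cs with _ | _
    · rfl
    · rw [pvGood_B (pvA_good h')] at h; exact h.symm ▸ rfl
  · exact pvGood_A (pvB_good h)

-- ===== VERDICT (by name: the statement is the Claim_ definition above) =====
theorem is_valid_config_py_spec : Claim_equal_is_valid_config_py := by
  intro config _
  unfold Spec_is_valid_config_py is_valid_config_py is_valid_config_py_alt
  by_cases he : config.toList = []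
  · simp [he]
  · simp only [he, if_false]
    set cs := PySem.Chars.strip config.toList with hcs
    by_cases h8 : cs.length < 8
    · simp [h8]
    · by_cases hM : cs.length > 10000
      · simp [h8, hM]
      · simp only [h8, hM, or_self, if_false]
        exact pvLoopA_eq_checkB cs
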